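-- pv_equiv track=rewrite | github.com/pva36/html2anki | convert.py | _split_basic_flashcards
-- ===== SOURCE A (Python) =====
-- def _split_basic_flashcards(
--     basic_flashcards: list[str],
-- ) -> list[tuple[str, str]]:
--     tuples: list[tuple[str, str]] = []
--     for flashcard in basic_flashcards:
--         back_segment: bool = False
--         front: str = ""
--         back: str = ""
--         lines = flashcard.split("\n")
--         for line in lines:
--             if '<hr class="frontback"' in line:
--                 back_segment = True
--                 continue
--             if not back_segment:
--                 front += line + "\n"
--             else:
--                 back += line + "\n"
--         tuples.append((front.rstrip(), back.rstrip()))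
--
--     return tuples
-- ===== SOURCE B (Python) =====
-- MARKER = '<hr class="frontback"'
--
-- def _split_basic_flashcards(
--     basic_flashcards: list[str],
-- ) -> list[tuple[str, str]]:
--     result: list[tuple[str, str]] = []
--     for flashcard in basic_flashcards:
--         lines = flashcard.split("\n")
--         idx = next((i for i, l in enumerate(lines) if MARKER in l), None)
--         if idx is None:
--             front_lines, back_lines = lines, []
--         else:
--             front_lines = lines[:idx]
--             back_lines = [l for l in lines[idx + 1:] if MARKER not in l]
--         result.append(("\n".join(front_lines).rstrip(),
--                        "\n".join(back_lines).rstrip()))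
--     return result
-- ===== Notes on version B (the rewrite author's own statement) =====
-- stated objective: alternative
-- what changed: Replaces the flag-toggling string-accumulation pass with a locate-split-filter decomposition: find the index of the first marker line, take the prefix as the front, filter remaining marker lines out of the suffix as the back, and join each part once.
import Mathlib
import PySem

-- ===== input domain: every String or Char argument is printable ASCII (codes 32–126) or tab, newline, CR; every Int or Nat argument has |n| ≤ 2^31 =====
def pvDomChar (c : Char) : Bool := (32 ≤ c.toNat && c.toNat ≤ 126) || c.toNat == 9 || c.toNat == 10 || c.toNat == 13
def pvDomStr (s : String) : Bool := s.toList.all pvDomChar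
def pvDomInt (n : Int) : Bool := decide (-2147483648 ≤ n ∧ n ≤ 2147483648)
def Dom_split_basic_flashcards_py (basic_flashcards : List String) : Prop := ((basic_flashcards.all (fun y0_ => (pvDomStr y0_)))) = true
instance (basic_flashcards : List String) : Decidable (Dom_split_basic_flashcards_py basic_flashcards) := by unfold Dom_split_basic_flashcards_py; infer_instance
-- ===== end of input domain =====

-- ===== PORT A =====
-- B replaces A's flag-toggling accumulation pass with a locate-split-filter decomposition (alternative, same cost).
def pvMarker : String := "<hr class=\"frontback\""

-- the body of A's inner 'for line in lines' loop
def pvStepA (st : Bool × String × String) (line : String) : Bool × String × String :=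
  if PySem.Str.isIn pvMarker line then (true, st.2.1, st.2.2)
  else if !st.1 then (st.1, st.2.1 ++ line ++ "\n", st.2.2)
  else (st.1, st.2.1, st.2.2 ++ line ++ "\n")

def split_basic_flashcards_py (basic_flashcards : List String) : List (String × String) :=
  basic_flashcards.foldl (fun tuples flashcard =>
    let lines := (PySem.Str.split? flashcard "\n").getD []
    let st := lines.foldl pvStepA (false, "", "")
    tuples ++ [(PySem.Str.rstrip st.2.1, PySem.Str.rstrip st.2.2)]) []

-- ===== PORT B =====
def split_basic_flashcards_py_alt (basic_flashcards : List String) : List (String × String) :=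
  basic_flashcards.map (fun flashcard =>
    let lines := (PySem.Str.split? flashcard "\n").getD []
    let parts : List String × List String :=
      match lines.findIdx? (fun l => PySem.Str.isIn pvMarker l) with
      | none => (lines, [])
      | some i => (lines.take i,
                   (lines.drop (i + 1)).filter (fun l => !(PySem.Str.isIn pvMarker l)))
    (PySem.Str.rstrip (PySem.Str.join "\n" parts.1),
     PySem.Str.rstrip (PySem.Str.join "\n" parts.2)))

-- ===== PRECONDITION & SPEC =====
def Spec_split_basic_flashcards_py (basic_flashcards : List String) (out : List (String × String)) : Prop := out = split_basic_flashcards_py_alt basic_flashcards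
instance (basic_flashcards : List String) (out : List (String × String)) : Decidable (Spec_split_basic_flashcards_py basic_flashcards out) := by unfold Spec_split_basic_flashcards_py; infer_instance

-- ===== CLAIM (what is proved, stated in full; the proofs are below) =====
def Claim_equal_split_basic_flashcards_py : Prop := ∀ (basic_flashcards : List String), Dom_split_basic_flashcards_py basic_flashcards → Spec_split_basic_flashcards_py basic_flashcards (split_basic_flashcards_py basic_flashcards)

-- ===== LEMMAS AND PROOFS =====

-- "line1\nline2\n…\n": what A's accumulation appends for a list of lines
def pvJoinNl (ls : List String) : String := ls.foldr (fun l acc => l ++ "\n" ++ acc) ""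

theorem pvJoinNl_cons (l : String) (ls : List String) :
    pvJoinNl (l :: ls) = l ++ "\n" ++ pvJoinNl ls := rfl

theorem pvStepA_marker (st : Bool × String × String) (l : String)
    (h : PySem.Str.isIn pvMarker l = true) : pvStepA st l = (true, st.2.1, st.2.2) := by
  simp only [PySem.Str.isIn_eq] at h; simp [pvStepA, h]

theorem pvStepA_front (f b l : String) (h : PySem.Str.isIn pvMarker l = false) :
    pvStepA (false, f, b) l = (false, f ++ l ++ "\n", b) := by
  simp only [PySem.Str.isIn_eq] at h; simp [pvStepA, h]

theorem pvStepA_back (f b l : String) (h : PySem.Str.isIn pvMarker l = false) :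
    pvStepA (true, f, b) l = (true, f, b ++ l ++ "\n") := by
  simp only [PySem.Str.isIn_eq] at h; simp [pvStepA, h]

-- A's inner loop once the marker has been seen: front is frozen, non-marker lines go to back
theorem pvLoopA_true (ls : List String) (f b : String) :
    ls.foldl pvStepA (true, f, b)
      = (true, f, b ++ pvJoinNl (ls.filter (fun l => !(PySem.Str.isIn pvMarker l)))) := by
  induction ls generalizing b with
  | nil => simp [pvJoinNl]
  | cons l ls ih =>
    cases h : PySem.Str.isIn pvMarker l with
    | true =>
      rw [List.foldl_cons, pvStepA_marker _ _ h, ih,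
        List.filter_cons_of_neg (by simp only [PySem.Str.isIn_eq] at h; simp [h])]
    | false =>
      rw [List.foldl_cons, pvStepA_back _ _ _ h, ih,
        List.filter_cons_of_pos (by simp only [PySem.Str.isIn_eq] at h; simp [h]), pvJoinNl_cons]
      simp [String.append_assoc]

-- A's whole inner loop, characterised by the position of the first marker line
theorem pvLoopA_false (ls : List String) (f b : String) :
    ls.foldl pvStepA (false, f, b)
      = match ls.findIdx? (fun l => PySem.Str.isIn pvMarker l) with
        | none => (false, f ++ pvJoinNl ls, b)
        | some i => (true, f ++ pvJoinNl (ls.take i),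
            b ++ pvJoinNl ((ls.drop (i + 1)).filter (fun l => !(PySem.Str.isIn pvMarker l)))) := by
  induction ls generalizing f with
  | nil => simp [pvJoinNl]
  | cons l ls ih =>
    rw [List.findIdx?_cons]
    cases h : PySem.Str.isIn pvMarker l with
    | true =>
      rw [List.foldl_cons, pvStepA_marker _ _ h, pvLoopA_true]
      simp [pvJoinNl]
    | false =>
      rw [List.foldl_cons, pvStepA_front _ _ _ h, ih]
      cases hf : ls.findIdx? (fun l => PySem.Str.isIn pvMarker l) with
      | none => simp [pvJoinNl_cons, String.append_assoc]
      | some i => simp [pvJoinNl_cons, String.append_assoc]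

theorem pvRstrip_append_newline (cs : List Char) :
    PySem.Chars.rstrip (cs ++ ['\n']) = PySem.Chars.rstrip cs := by
  simp [PySem.Chars.rstrip, show PySem.Chars.isspace '\n' = true from rfl]

theorem pvRstrip_append_congr (p x y : List Char)
    (h : PySem.Chars.rstrip x = PySem.Chars.rstrip y) :
    PySem.Chars.rstrip (p ++ x) = PySem.Chars.rstrip (p ++ y) := by
  have hx : List.dropWhile PySem.Chars.isspace x.reverse = (PySem.Chars.rstrip x).reverse := by
    simp [PySem.Chars.rstrip]
  have hy : List.dropWhile PySem.Chars.isspace y.reverse = (PySem.Chars.rstrip y).reverse := by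
    simp [PySem.Chars.rstrip]
  unfold PySem.Chars.rstrip
  rw [List.reverse_append, List.reverse_append, List.dropWhile_append, List.dropWhile_append,
    hx, hy, h]

-- char-level: trailing-newline concatenation and '\n'-intercalation agree up to rstrip
theorem pvRstrip_concatNl (xs : List (List Char)) :
    PySem.Chars.rstrip (xs.foldr (fun l acc => l ++ '\n' :: acc) [])
      = PySem.Chars.rstrip (List.intercalate ['\n'] xs) := by
  induction xs with
  | nil => rfl
  | cons a rest ih =>
    cases rest with
    | nil => simpa [List.intercalate] using pvRstrip_append_newline a
    | cons b rest' =>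
      rw [show List.intercalate ['\n'] (a :: b :: rest')
            = a ++ '\n' :: List.intercalate ['\n'] (b :: rest') by
          simp [List.intercalate, List.intersperse]]
      rw [List.foldr_cons,
        show a ++ '\n' :: (b :: rest').foldr (fun l acc => l ++ '\n' :: acc) []
          = (a ++ ['\n']) ++ (b :: rest').foldr (fun l acc => l ++ '\n' :: acc) [] by simp,
        show a ++ '\n' :: List.intercalate ['\n'] (b :: rest')
          = (a ++ ['\n']) ++ List.intercalate ['\n'] (b :: rest') by simp]
      exact pvRstrip_append_congr _ _ _ ih

theorem pvToList_joinNl (ls : List String) :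
    (pvJoinNl ls).toList = (ls.map String.toList).foldr (fun l acc => l ++ '\n' :: acc) [] := by
  induction ls with
  | nil => rfl
  | cons l ls ih => simp [pvJoinNl_cons, ih]

-- joining with trailing newlines and '\n'.join agree up to rstrip
theorem pvRstrip_joinNl (ls : List String) :
    PySem.Str.rstrip (pvJoinNl ls) = PySem.Str.rstrip (PySem.Str.join "\n" ls) := by
  apply String.toList_inj.mp
  rw [PySem.Str.toList_rstrip, PySem.Str.toList_rstrip, PySem.Str.toList_join,
    pvToList_joinNl]
  exact pvRstrip_concatNl (ls.map String.toList)

theorem pvPerCard (flashcard : String) :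
    (let lines := (PySem.Str.split? flashcard "\n").getD []
     let st := lines.foldl pvStepA (false, "", "")
     (PySem.Str.rstrip st.2.1, PySem.Str.rstrip st.2.2))
    = (let lines := (PySem.Str.split? flashcard "\n").getD []
       let parts : List String × List String :=
         match lines.findIdx? (fun l => PySem.Str.isIn pvMarker l) with
         | none => (lines, [])
         | some i => (lines.take i,
                      (lines.drop (i + 1)).filter (fun l => !(PySem.Str.isIn pvMarker l)))
       (PySem.Str.rstrip (PySem.Str.join "\n" parts.1),
        PySem.Str.rstrip (PySem.Str.join "\n" parts.2))) := by
  simp only [pvLoopA_false]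
  cases hf : ((PySem.Str.split? flashcard "\n").getD []).findIdx? (fun l => PySem.Str.isIn pvMarker l) with
  | none => exact Prod.ext (by simpa using pvRstrip_joinNl _) (by simpa using pvRstrip_joinNl [])
  | some i => exact Prod.ext (by simpa using pvRstrip_joinNl _) (by simpa using pvRstrip_joinNl _)

-- ===== VERDICT (by name: the statement is the Claim_ definition above) =====
theorem split_basic_flashcards_py_spec : Claim_equal_split_basic_flashcards_py := by
  intro bfs _
  unfold Spec_split_basic_flashcards_py split_basic_flashcards_py split_basic_flashcards_py_alt
  rw [PySem.List.foldl_append_singleton_eq_map, List.nil_append]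
  exact List.map_congr_left (fun card _ => pvPerCard card)
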